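-- pv_equiv track=rewrite | github.com/MrBrantCode/unitest_baseline | mut_generate/mist_train_taco/taco_3098/solution.py | get_middle_permutation
-- ===== SOURCE A (Python) =====
-- def get_middle_permutation(s: str) -> str:
--     """
--     Returns the middle permutation of the input string `s` when all permutations are ordered lexicographically.
--
--     Parameters:
--     - s (str): A string containing unique letters. The length of the string is between 2 and 26.
--
--     Returns:
--     - str: The middle permutation of the input string.
--     """
--     sorted_s = sorted(s)
--     if len(sorted_s) % 2 == 0:
--         middle_index = len(sorted_s) // 2 - 1
--         middle_char = sorted_s.pop(middle_index)
--         return middle_char + ''.join(sorted_s[::-1])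
--     else:
--         middle_index = len(sorted_s) // 2
--         middle_char = sorted_s.pop(middle_index)
--         return middle_char + get_middle_permutation(''.join(sorted_s))
-- ===== SOURCE B (Python) =====
-- def get_middle_permutation(s: str) -> str:
--     chars = sorted(s)
--     out = []
--     while len(chars) % 2 == 1:
--         out.append(chars.pop(len(chars) // 2))
--     out.append(chars.pop(len(chars) // 2 - 1))
--     out.extend(reversed(chars))
--     return ''.join(out)
-- ===== Notes on version B (the rewrite author's own statement) =====
-- stated objective: simpler
-- what changed: Replaces A's recursion (which re-sorts the remaining characters on every call) with a single sort followed by an iterative pop loop accumulating into one output list.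
import Mathlib
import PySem

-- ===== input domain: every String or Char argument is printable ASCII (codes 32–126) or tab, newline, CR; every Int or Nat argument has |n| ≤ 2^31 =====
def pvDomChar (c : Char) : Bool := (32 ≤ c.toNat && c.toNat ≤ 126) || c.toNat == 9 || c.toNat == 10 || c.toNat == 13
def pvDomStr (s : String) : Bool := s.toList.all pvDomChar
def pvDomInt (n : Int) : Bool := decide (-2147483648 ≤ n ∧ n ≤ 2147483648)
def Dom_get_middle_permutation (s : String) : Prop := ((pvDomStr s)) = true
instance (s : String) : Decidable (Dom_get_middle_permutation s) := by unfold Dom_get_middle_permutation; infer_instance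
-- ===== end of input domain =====

-- B replaces A's recursion (which re-sorts the remainder on every call) with one sort and an iterative pop loop (simpler).

-- ===== PORT A =====
def get_middle_permutation (s : String) : String :=
  let sorted_s := PySem.List.sorted s.toList (fun c => c) false
  if sorted_s.length % 2 == 0 then
    match PySem.List.pop? sorted_s (PySem.Int.floordiv (sorted_s.length : Int) 2 - 1) with
    | some (mc, rest) => String.ofList (mc :: ((PySem.List.slice? rest none none (-1)).getD []))
    | none => ""   -- IndexError (excluded by Pre_)
  else
    match _h : PySem.List.pop? sorted_s (PySem.Int.floordiv (sorted_s.length : Int) 2) with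
    | some (mc, rest) => String.ofList (mc :: (get_middle_permutation (String.ofList rest)).toList)
    | none => ""   -- IndexError (unreachable: an odd length is ≥ 1)
termination_by s.toList.length
decreasing_by
  have hp := PySem.List.length_of_pop?_eq_some _ _h
  simp only [] at hp
  have hl : sorted_s.length = s.toList.length := PySem.List.length_sorted _ _ _
  simp only [String.toList_ofList]
  omega

-- ===== PORT B =====
-- the while loop of Source B: pop the lone middle while the length is odd, then the even-length finish
def gmpLoop (chars out : List Char) : String :=
  if chars.length % 2 == 1 then
    match _h : PySem.List.pop? chars (PySem.Int.floordiv (chars.length : Int) 2) with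
    | some (c, rest) => gmpLoop rest (out ++ [c])
    | none => ""   -- IndexError (unreachable: an odd length is ≥ 1)
  else
    match PySem.List.pop? chars (PySem.Int.floordiv (chars.length : Int) 2 - 1) with
    | some (c, rest) => String.ofList (out ++ [c] ++ rest.reverse)
    | none => ""   -- IndexError (excluded by Pre_)
termination_by chars.length
decreasing_by
  have hp := PySem.List.length_of_pop?_eq_some _ _h
  simp only [] at hp
  omega

def get_middle_permutation_alt (s : String) : String :=
  gmpLoop (PySem.List.sorted s.toList (fun c => c) false) []

-- ===== PRECONDITION & SPEC =====
-- Pre_ excludes strings of length < 2, on which A raises IndexError (pop on an empty list).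
def Pre_get_middle_permutation (s : String) : Prop := 2 ≤ s.toList.length
instance (s : String) : Decidable (Pre_get_middle_permutation s) := by unfold Pre_get_middle_permutation; infer_instance
def pvWitness_get_middle_permutation : String := "ba"

def Spec_get_middle_permutation (s : String) (out : String) : Prop := out = get_middle_permutation_alt s
instance (s : String) (out : String) : Decidable (Spec_get_middle_permutation s out) := by unfold Spec_get_middle_permutation; infer_instance

-- ===== CLAIM (what is proved, stated in full; the proofs are below) =====
def Claim_equal_get_middle_permutation : Prop := ∀ (s : String), Dom_get_middle_permutation s → Pre_get_middle_permutation s → Spec_get_middle_permutation s (get_middle_permutation s)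

-- ===== LEMMAS AND PROOFS =====

lemma floordiv_len_two (n : Nat) : PySem.Int.floordiv (n : Int) 2 = ((n / 2 : Nat) : Int) := by
  rw [PySem.Int.floordiv_eq_ediv_of_pos (by omega)]
  omega

lemma even_popped (L : List Char) (h2 : 2 ≤ L.length) (he : L.length % 2 = 0) :
    PySem.List.pop? L (PySem.Int.floordiv (L.length : Int) 2 - 1)
      = some (L[L.length / 2 - 1]'(by omega), L.eraseIdx (L.length / 2 - 1)) := by
  have hidx : PySem.Int.floordiv (L.length : Int) 2 - 1 = ((L.length / 2 - 1 : Nat) : Int) := by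
    rw [floordiv_len_two]; omega
  rw [hidx]
  exact PySem.List.pop?_natCast L _ (by omega)

lemma odd_popped (L : List Char) (h1 : 1 ≤ L.length) (ho : L.length % 2 = 1) :
    PySem.List.pop? L (PySem.Int.floordiv (L.length : Int) 2)
      = some (L[L.length / 2]'(by omega), L.eraseIdx (L.length / 2)) := by
  rw [floordiv_len_two]
  exact PySem.List.pop?_natCast L _ (by omega)

lemma A_even (s : String) (t : List Char)
    (ht : PySem.List.sorted s.toList (fun c => c) false = t)
    (h2 : 2 ≤ t.length) (he : t.length % 2 = 0) :
    get_middle_permutation s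
      = String.ofList (t[t.length / 2 - 1]'(by omega) :: (t.eraseIdx (t.length / 2 - 1)).reverse) := by
  rw [get_middle_permutation.eq_def]
  simp only [ht]
  rw [even_popped t h2 he]
  simp [he, PySem.List.slice?_none_none_neg_one]

lemma A_odd (s : String) (t : List Char)
    (ht : PySem.List.sorted s.toList (fun c => c) false = t)
    (h1 : 1 ≤ t.length) (ho : t.length % 2 = 1) :
    get_middle_permutation s
      = String.ofList (t[t.length / 2]'(by omega)
          :: (get_middle_permutation (String.ofList (t.eraseIdx (t.length / 2)))).toList) := by
  rw [get_middle_permutation.eq_def]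
  simp only [ht]
  split
  · next hcond =>
    simp [ho] at hcond
  · split
    · next mc rest h =>
      rw [ht] at h
      rw [odd_popped t h1 ho] at h
      obtain ⟨rfl, rfl⟩ := Prod.mk.inj (Option.some.inj h)
      rfl
    · next h =>
      rw [ht] at h
      rw [odd_popped t h1 ho] at h
      simp at h

lemma gmpLoop_even (t out : List Char) (h2 : 2 ≤ t.length) (he : t.length % 2 = 0) :
    gmpLoop t out
      = String.ofList (out ++ [t[t.length / 2 - 1]'(by omega)] ++ (t.eraseIdx (t.length / 2 - 1)).reverse) := by
  rw [gmpLoop.eq_def]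
  rw [even_popped t h2 he]
  simp [he]

lemma gmpLoop_odd (t out : List Char) (h1 : 1 ≤ t.length) (ho : t.length % 2 = 1) :
    gmpLoop t out = gmpLoop (t.eraseIdx (t.length / 2)) (out ++ [t[t.length / 2]'(by omega)]) := by
  rw [gmpLoop.eq_def]
  split
  · split
    · next c rest h =>
      rw [odd_popped t h1 ho] at h
      obtain ⟨rfl, rfl⟩ := Prod.mk.inj (Option.some.inj h)
      rfl
    · next h =>
      rw [odd_popped t h1 ho] at h
      simp at h
  · next hcond =>
    simp [ho] at hcond

-- ===== VERDICT (by name: the statement is the Claim_ definition above) =====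
theorem get_middle_permutation_spec : Claim_equal_get_middle_permutation := by
  intro s _ hpre
  unfold Spec_get_middle_permutation
  unfold Pre_get_middle_permutation at hpre
  have hlen := PySem.List.length_sorted s.toList (fun c => c) false
  have hpw := PySem.List.sorted_pairwise s.toList (fun c => c)
  set L := PySem.List.sorted s.toList (fun c => c) false with hL
  have h2 : 2 ≤ L.length := by omega
  show get_middle_permutation s = gmpLoop L []
  by_cases he : L.length % 2 = 0
  · rw [A_even s L hL.symm h2 he, gmpLoop_even L [] h2 he]
    simp
  · have ho : L.length % 2 = 1 := Nat.mod_two_eq_zero_or_one L.length |>.resolve_left he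
    have h3 : 3 ≤ L.length := by omega
    set rest := L.eraseIdx (L.length / 2) with hrest
    have hrl : rest.length + 1 = L.length := by
      have := PySem.List.length_of_pop?_eq_some _ (odd_popped L (by omega) ho)
      simpa [hrest] using this
    have hpwr : List.Pairwise (fun a b => (fun c : Char => c) a ≤ (fun c : Char => c) b) rest :=
      List.Pairwise.sublist (List.eraseIdx_sublist L (L.length / 2)) hpw
    have hsr : PySem.List.sorted (String.ofList rest).toList (fun c => c) false = rest := by
      rw [String.toList_ofList]
      exact PySem.List.sorted_eq_self_of_pairwise rest (fun c => c) hpwr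
    have h2r : 2 ≤ rest.length := by omega
    have her : rest.length % 2 = 0 := by omega
    rw [A_odd s L hL.symm (by omega) ho, gmpLoop_odd L [] (by omega) ho,
        A_even (String.ofList rest) rest hsr h2r her, gmpLoop_even rest _ h2r her]
    simp
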